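-- pv_equiv track=rewrite | github.com/clio-vega/proofs | verify_multiplicity_bundle.py | crystal_fi
-- ===== SOURCE A (Python) =====
-- def crystal_fi(b, i, n, k):
--     """Apply f_i using signature rule for sl_n on a k-tuple."""
--     signs = []
--     positions = []
--     for pos in range(k):
--         if b[pos] == i:
--             signs.append('+')
--             positions.append(pos)
--         elif b[pos] == i+1:
--             signs.append('-')
--             positions.append(pos)
--     if not signs:
--         return None
--     # Parenthesis matching: each - cancels with nearest unmatched + to its LEFT
--     matched = [False] * len(signs)
--     for idx in range(len(signs)):
--         if signs[idx] == '-':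
--             for q in range(idx-1, -1, -1):
--                 if signs[q] == '+' and not matched[q]:
--                     matched[q] = True
--                     matched[idx] = True
--                     break
--     # f_i acts on LEFTMOST unmatched +
--     target = -1
--     for idx in range(len(signs)):
--         if signs[idx] == '+' and not matched[idx]:
--             target = positions[idx]
--             break
--     if target == -1:
--         return None
--     result = list(b)
--     result[target] = i + 1
--     return tuple(result)
-- ===== SOURCE B (Python) =====
-- def crystal_fi(b, i, n, k):
--     """Apply f_i using signature rule for sl_n on a k-tuple (one-pass bracket matching)."""
--     stack = []  # positions of currently unmatched '+'
--     for pos in range(k):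
--         v = b[pos]
--         if v == i:
--             stack.append(pos)
--         elif v == i + 1:
--             if stack:
--                 stack.pop()
--     if not stack:
--         return None
--     result = list(b)
--     result[stack[0]] = i + 1
--     return tuple(result)
-- ===== Notes on version B (the rewrite author's own statement) =====
-- stated objective: simpler
-- what changed: Replaced A's three-pass signature-rule evaluation (collect signs and positions, then for each '-' scan left through all earlier signs for an unmatched '+', then rescan for the leftmost unmatched '+') by a single pass that keeps a stack of unmatched '+' positions, popping on '-'; the bottom of the final stack is the target.
import Mathlib
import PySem

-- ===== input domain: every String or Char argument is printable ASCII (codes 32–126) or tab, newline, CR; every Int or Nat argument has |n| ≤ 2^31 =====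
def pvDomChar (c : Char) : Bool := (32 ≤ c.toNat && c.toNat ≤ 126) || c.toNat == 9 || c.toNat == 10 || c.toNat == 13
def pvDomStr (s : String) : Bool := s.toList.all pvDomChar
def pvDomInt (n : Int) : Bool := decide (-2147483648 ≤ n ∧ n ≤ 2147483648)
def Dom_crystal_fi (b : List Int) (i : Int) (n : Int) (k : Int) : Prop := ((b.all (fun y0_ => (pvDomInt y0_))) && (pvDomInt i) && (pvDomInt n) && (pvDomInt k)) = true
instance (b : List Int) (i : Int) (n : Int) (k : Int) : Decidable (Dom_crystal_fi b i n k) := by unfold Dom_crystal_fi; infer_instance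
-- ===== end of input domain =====

-- B replaces A's three passes (collect signs, scan-left matching per '-', rescan for the
-- leftmost unmatched '+') with a single pass keeping a stack of unmatched '+' positions
-- (objective: simpler).

-- ===== PORT A =====
-- first loop: collect signs and positions (pyGet? none = IndexError, propagated as none; excluded by Pre_)
def fiCollect (b : List Int) (i : Int) : List Int → Option (List Char × List Int)
  | [] => some ([], [])
  | pos :: rest =>
    match PySem.List.pyGet? b pos with
    | none => none
    | some v =>
      match fiCollect b i rest with
      | none => none
      | some (signs, positions) =>
        if v = i then some ('+' :: signs, pos :: positions)
        else if v = i + 1 then some ('-' :: signs, pos :: positions)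
        else some (signs, positions)

-- inner loop `for q in range(idx-1, -1, -1)`: scan indices t-1, …, 0 for an unmatched '+'
def fiScan (signs : List Char) (matched : List Bool) : Nat → Option Nat
  | 0 => none
  | t + 1 =>
    if (signs.getD t ' ' == '+') && !(matched.getD t false) then some t
    else fiScan signs matched t

-- middle loop over idx, threading the `matched` array
def fiMatchLoop (signs : List Char) : List Bool → List Nat → List Bool
  | matched, [] => matched
  | matched, idx :: rest =>
    if signs.getD idx ' ' == '-' then
      match fiScan signs matched idx with
      | some q => fiMatchLoop signs ((matched.set q true).set idx true) rest
      | none => fiMatchLoop signs matched rest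
    else fiMatchLoop signs matched rest

-- final loop: leftmost unmatched '+' (target = -1 sentinel, as in A)
def fiTargetLoop (signs : List Char) (matched : List Bool) (positions : List Int) : List Nat → Int
  | [] => -1
  | idx :: rest =>
    if (signs.getD idx ' ' == '+') && !(matched.getD idx false) then positions.getD idx 0
    else fiTargetLoop signs matched positions rest

def crystal_fi (b : List Int) (i : Int) (n : Int) (k : Int) : Option (List Int) :=
  match fiCollect b i (PySem.List.pyRange 0 k 1) with
  | none => none
  | some (signs, positions) =>
    if signs = [] then none
    else
      let matched := fiMatchLoop signs (List.replicate signs.length false) (List.range signs.length)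
      let target := fiTargetLoop signs matched positions (List.range signs.length)
      if target = -1 then none
      -- target is a nonnegative position here, so .toNat is exact
      else some (b.set target.toNat (i + 1))

-- ===== PORT B =====
-- one pass: stack of positions of currently unmatched '+' (pyGet? none = IndexError → none)
def altLoop (b : List Int) (i : Int) : List Int → List Int → Option (List Int)
  | stack, [] => some stack
  | stack, pos :: rest =>
    match PySem.List.pyGet? b pos with
    | none => none
    | some v =>
      if v = i then altLoop b i (stack ++ [pos]) rest
      else if v = i + 1 then
        if stack = [] then altLoop b i stack rest
        else altLoop b i stack.dropLast rest
      else altLoop b i stack rest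

def crystal_fi_alt (b : List Int) (i : Int) (n : Int) (k : Int) : Option (List Int) :=
  match altLoop b i [] (PySem.List.pyRange 0 k 1) with
  | none => none
  | some [] => none
  -- stack[0]: the leftmost surviving '+' position, nonnegative, so .toNat is exact
  | some (p :: _) => some (b.set p.toNat (i + 1))

-- ===== PRECONDITION & SPEC =====
-- Pre_ excludes exactly the inputs where Python A raises IndexError: k larger than len(b).
def Pre_crystal_fi (b : List Int) (i : Int) (n : Int) (k : Int) : Prop := k ≤ (b.length : Int)
instance (b : List Int) (i : Int) (n : Int) (k : Int) : Decidable (Pre_crystal_fi b i n k) := by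
  unfold Pre_crystal_fi; infer_instance

def pvWitness_crystal_fi : List Int × Int × Int × Int := ([1, 2, 1, 1], 1, 3, 4)

def Spec_crystal_fi (b : List Int) (i : Int) (n : Int) (k : Int) (out : Option (List Int)) : Prop := out = crystal_fi_alt b i n k
instance (b : List Int) (i : Int) (n : Int) (k : Int) (out : Option (List Int)) : Decidable (Spec_crystal_fi b i n k out) := by unfold Spec_crystal_fi; infer_instance

-- ===== CLAIM (what is proved, stated in full; the proofs are below) =====
def Claim_equal_crystal_fi : Prop := ∀ (b : List Int) (i : Int) (n : Int) (k : Int), Dom_crystal_fi b i n k → Pre_crystal_fi b i n k → Spec_crystal_fi b i n k (crystal_fi b i n k)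

-- ===== LEMMAS AND PROOFS =====

-- the (sign, position) pairs both programs select, in order
def annOf (b : List Int) (i : Int) (L : List Int) : List (Char × Int) :=
  L.filterMap (fun pos =>
    match PySem.List.pyGet? b pos with
    | none => none
    | some v =>
      if v = i then some ('+', pos)
      else if v = i + 1 then some ('-', pos)
      else none)

-- abstract stack of unmatched-'+' indices after scanning the first t signs
def stepSN (s : List Char) (acc : List Nat) (j : Nat) : List Nat :=
  if s.getD j ' ' == '+' then acc ++ [j] else acc.dropLast

def SN (s : List Char) (t : Nat) : List Nat := (List.range t).foldl (stepSN s) []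

-- B's stack step on pairs
def stepB (st : List Int) (x : Char × Int) : List Int :=
  if x.1 = '+' then st ++ [x.2] else st.dropLast

-- indices < t that are unmatched '+' under m
def unm (s : List Char) (m : List Bool) (t : Nat) : List Nat :=
  (List.range t).filter (fun q => (s.getD q ' ' == '+') && !(m.getD q false))


theorem SN_succ (s : List Char) (t : Nat) : SN s (t + 1) = stepSN s (SN s t) t := by
  simp [SN, List.range_succ]

theorem getD_set_ne (l : List Bool) (i j : Nat) (x d : Bool) (h : i ≠ j) :
    (l.set i x).getD j d = l.getD j d := by
  simp [List.getD_eq_getElem?_getD, List.getElem?_set_ne h]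

theorem getD_set_self (l : List Bool) (i : Nat) (x d : Bool) (h : i < l.length) :
    (l.set i x).getD i d = x := by
  simp [List.getD_eq_getElem?_getD, h]

theorem fiCollect_eq (b : List Int) (i : Int) (L : List Int)
    (hok : ∀ p ∈ L, (PySem.List.pyGet? b p).isSome) :
    fiCollect b i L = some ((annOf b i L).map Prod.fst, (annOf b i L).map Prod.snd) := by
  induction L with
  | nil => simp [fiCollect, annOf]
  | cons p rest ih =>
    have hp := hok p (by simp)
    obtain ⟨v, hv⟩ := Option.isSome_iff_exists.mp hp
    have hrest : ∀ q ∈ rest, (PySem.List.pyGet? b q).isSome := fun q hq => hok q (by simp [hq])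
    simp only [fiCollect, annOf, List.filterMap_cons, hv, ih hrest]
    split_ifs <;> simp

theorem altLoop_eq (b : List Int) (i : Int) (L : List Int)
    (hok : ∀ p ∈ L, (PySem.List.pyGet? b p).isSome) (st : List Int) :
    altLoop b i st L = some ((annOf b i L).foldl stepB st) := by
  induction L generalizing st with
  | nil => simp [altLoop, annOf]
  | cons p rest ih =>
    have hp := hok p (by simp)
    obtain ⟨v, hv⟩ := Option.isSome_iff_exists.mp hp
    have hrest : ∀ q ∈ rest, (PySem.List.pyGet? b q).isSome := fun q hq => hok q (by simp [hq])
    simp only [altLoop, annOf, List.filterMap_cons, hv]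
    split_ifs <;> simp_all [annOf, ih hrest, stepB]

theorem fiScan_eq (s : List Char) (m : List Bool) (t : Nat) :
    fiScan s m t = (unm s m t).getLast? := by
  induction t with
  | zero => simp [fiScan, unm]
  | succ t ih =>
    rw [fiScan, ih]
    unfold unm
    rw [List.range_succ, List.filter_append, List.filter_singleton]
    by_cases h : ((s.getD t ' ' == '+') && !(m.getD t false)) = true
    · rw [if_pos h]
      simp only [h, cond_true]
      exact List.getLast?_concat.symm
    · rw [if_neg h]
      simp only [h, cond_false, List.append_nil]

theorem fiMatchLoop_append (s : List Char) (m : List Bool) (xs ys : List Nat) :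
    fiMatchLoop s m (xs ++ ys) = fiMatchLoop s (fiMatchLoop s m xs) ys := by
  induction xs generalizing m with
  | nil => simp [fiMatchLoop]
  | cons x xs ih =>
    rw [List.cons_append, fiMatchLoop, fiMatchLoop]
    split
    · split <;> exact ih _
    · exact ih _

theorem fiTargetLoop_eq (s : List Char) (m : List Bool) (P : List Int) (l : List Nat) :
    fiTargetLoop s m P l =
      (match (l.filter (fun q => (s.getD q ' ' == '+') && !(m.getD q false))).head? with
       | some j => P.getD j 0
       | none => -1) := by
  induction l with
  | nil => simp [fiTargetLoop]
  | cons idx rest ih =>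
    rw [fiTargetLoop, List.filter_cons]
    by_cases h : ((s.getD idx ' ' == '+') && !(m.getD idx false)) = true
    · rw [if_pos h, if_pos h, List.head?_cons]
    · rw [if_neg h, if_neg h, ih]

theorem SN_lt (s : List Char) (t : Nat) : ∀ j ∈ SN s t, j < t := by
  induction t with
  | zero => simp [SN]
  | succ t ih =>
    have hstep : SN s (t + 1) = stepSN s (SN s t) t := by
      simp [SN, List.range_succ]
    rw [hstep]
    unfold stepSN
    split
    · intro j hj
      rcases List.mem_append.mp hj with h | h
      · exact Nat.lt_succ_of_lt (ih j h)
      · simp at h; omega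
    · intro j hj
      exact Nat.lt_succ_of_lt (ih j ((List.dropLast_sublist _).mem hj))

theorem SN_congr (s₁ s₂ : List Char) (t : Nat)
    (h : ∀ j < t, s₁.getD j ' ' = s₂.getD j ' ') : SN s₁ t = SN s₂ t := by
  induction t with
  | zero => simp [SN]
  | succ t ih =>
    have h1 : SN s₁ (t + 1) = stepSN s₁ (SN s₁ t) t := by simp [SN, List.range_succ]
    have h2 : SN s₂ (t + 1) = stepSN s₂ (SN s₂ t) t := by simp [SN, List.range_succ]
    rw [h1, h2, ih (fun j hj => h j (Nat.lt_succ_of_lt hj)), stepSN, stepSN,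
      h t (Nat.lt_succ_self t)]

-- main invariant of A's matching loop
theorem matchLoop_inv (s : List Char) (hs : ∀ c ∈ s, c = '+' ∨ c = '-') (t : Nat)
    (ht : t ≤ s.length) :
    (fiMatchLoop s (List.replicate s.length false) (List.range t)).length = s.length ∧
    (∀ q, t ≤ q → (fiMatchLoop s (List.replicate s.length false) (List.range t)).getD q false = false) ∧
    unm s (fiMatchLoop s (List.replicate s.length false) (List.range t)) t = SN s t := by
  induction t with
  | zero =>
    refine ⟨by simp [fiMatchLoop], ?_, by simp [unm, SN]⟩
    intro q _
    simp [fiMatchLoop, List.getD_eq_getElem?_getD, List.getElem?_replicate]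
    split <;> rfl
  | succ t ih =>
    have htlen : t < s.length := ht
    obtain ⟨ihlen, ihfalse, ihunm⟩ := ih (Nat.le_of_succ_le ht)
    set M := fiMatchLoop s (List.replicate s.length false) (List.range t) with hM
    have hstep : fiMatchLoop s (List.replicate s.length false) (List.range (t + 1)) =
        fiMatchLoop s M [t] := by
      rw [List.range_succ, fiMatchLoop_append]
    have hchar : s.getD t ' ' = s[t] := List.getD_eq_getElem s ' ' htlen
    rcases hs s[t] (List.getElem_mem htlen) with hplus | hminus
    · -- s[t] = '+' : matched unchanged, stack grows
      have hne : (s.getD t ' ' == '-') = false := by rw [hchar, hplus]; rfl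
      have hM' : fiMatchLoop s M [t] = M := by
        rw [fiMatchLoop, hne]; rfl
      rw [hstep, hM']
      refine ⟨ihlen, fun q hq => ihfalse q (Nat.le_of_succ_le hq), ?_⟩
      have hcondt : ((s.getD t ' ' == '+') && !(M.getD t false)) = true := by
        rw [hchar, hplus, ihfalse t le_rfl]; rfl
      unfold unm
      rw [List.range_succ, List.filter_append, List.filter_singleton]
      simp only [hcondt, cond_true]
      rw [SN_succ]
      unfold stepSN
      rw [if_pos (by rw [hchar, hplus]; rfl)]
      rw [← ihunm]; rfl
    · -- s[t] = '-' : pop the nearest unmatched '+'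
      have hyes : (s.getD t ' ' == '-') = true := by rw [hchar, hminus]; rfl
      have hnotplus : (s.getD t ' ' == '+') = false := by rw [hchar, hminus]; rfl
      have hscan : fiScan s M t = (SN s t).getLast? := by rw [fiScan_eq, ihunm]
      rcases hlast : (SN s t).getLast? with _ | q
      · -- empty stack: nothing matched
        have hSN : SN s t = [] := List.getLast?_eq_none_iff.mp hlast
        have hM' : fiMatchLoop s M [t] = M := by
          rw [fiMatchLoop, hyes]
          simp only [hscan, hlast]
          rfl
        rw [hstep, hM']
        refine ⟨ihlen, fun q hq => ihfalse q (Nat.le_of_succ_le hq), ?_⟩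
        unfold unm
        rw [List.range_succ, List.filter_append, List.filter_singleton]
        simp only [hnotplus, Bool.false_and, cond_false, List.append_nil]
        rw [SN_succ]
        unfold stepSN
        rw [if_neg (by rw [hnotplus]; simp)]
        show unm s M t = (SN s t).dropLast
        rw [ihunm, hSN]
        rfl
      · -- stack ends in q : matched[q] and matched[t] are set
        obtain ⟨ys, hys⟩ := List.getLast?_eq_some_iff.mp hlast
        have hqmem : q ∈ unm s M t := by rw [ihunm, hys]; exact List.mem_append_right _ (by simp)
        have hqfilter := List.mem_filter.mp hqmem
        have hqt : q < t := List.mem_range.mp hqfilter.1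
        have hqlen : q < s.length := Nat.lt_trans hqt htlen
        have hM' : fiMatchLoop s M [t] = (M.set q true).set t true := by
          rw [fiMatchLoop, hyes]
          simp only [hscan, hlast]
          rfl
        rw [hstep, hM']
        refine ⟨by simp [ihlen], ?_, ?_⟩
        · intro q' hq'
          rw [getD_set_ne _ _ _ _ _ (by omega), getD_set_ne _ _ _ _ _ (by omega)]
          exact ihfalse q' (Nat.le_of_succ_le hq')
        · unfold unm
          rw [List.range_succ, List.filter_append, List.filter_singleton]
          simp only [hnotplus, Bool.false_and, cond_false, List.append_nil]
          have hcongr : List.filter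
              (fun j => (s.getD j ' ' == '+') && !(((M.set q true).set t true).getD j false))
              (List.range t) =
              List.filter
              (fun j => decide (j ≠ q) && ((s.getD j ' ' == '+') && !(M.getD j false)))
              (List.range t) := by
            apply List.filter_congr
            intro j hj
            have hjt : j < t := List.mem_range.mp hj
            by_cases hjq : j = q
            · subst hjq
              rw [getD_set_ne _ _ _ _ _ (by omega),
                getD_set_self _ _ _ _ (by rw [ihlen]; exact hqlen)]
              simp
            · rw [getD_set_ne _ _ _ _ _ (by omega), getD_set_ne _ _ _ _ _ (Ne.symm hjq)]
              simp [hjq]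
          rw [hcongr, ← List.filter_filter]
          have hufold : List.filter (fun q => (s.getD q ' ' == '+') && !(M.getD q false))
              (List.range t) = SN s t := ihunm
          rw [hufold, hys, List.filter_append]
          have hnodup : (ys ++ [q]).Nodup := by
            rw [← hys, ← ihunm]
            exact List.Nodup.filter _ (List.nodup_range)
          have hqys : q ∉ ys := by
            intro hmem
            rw [List.nodup_append] at hnodup
            obtain ⟨-, -, hd⟩ := hnodup
            exact absurd rfl (hd q hmem q (by simp))
          have h1 : List.filter (fun j => decide (j ≠ q)) ys = ys :=
            List.filter_eq_self.mpr (fun a ha => by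
              simp only [decide_eq_true_eq]
              exact fun h => hqys (h ▸ ha))
          have h2 : List.filter (fun j => decide (j ≠ q)) [q] = [] := by simp
          rw [h1, h2, List.append_nil, SN_succ]
          unfold stepSN
          rw [if_neg (by rw [hnotplus]; simp), hys, List.dropLast_concat]

-- B's stack equals the abstract index stack, mapped through positions
theorem stack_eq (a : List (Char × Int)) :
    a.foldl stepB [] = (SN (a.map Prod.fst) a.length).map (fun j => (a.map Prod.snd).getD j 0) := by
  induction a using List.reverseRecOn with
  | nil => simp [SN]
  | append_singleton a x ih =>
    rw [List.foldl_append, List.foldl_cons, List.foldl_nil, ih]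
    have hs' : (a ++ [x]).map Prod.fst = a.map Prod.fst ++ [x.1] := by simp
    have hP' : (a ++ [x]).map Prod.snd = a.map Prod.snd ++ [x.2] := by simp
    have hlen : (a ++ [x]).length = a.length + 1 := by simp
    rw [hs', hP', hlen, SN_succ]
    have hcong : SN (a.map Prod.fst ++ [x.1]) a.length = SN (a.map Prod.fst) a.length := by
      apply SN_congr
      intro j hj
      rw [List.getD_eq_getElem?_getD, List.getD_eq_getElem?_getD,
        List.getElem?_append_left (by simp; omega)]
    have hget : (a.map Prod.fst ++ [x.1]).getD a.length ' ' = x.1 := by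
      have hl : a.length = (a.map Prod.fst).length := by simp
      rw [hl, List.getD_eq_getElem?_getD]
      simp
    have hmap : ∀ l : List Nat, (∀ j ∈ l, j < a.length) →
        l.map (fun j => (a.map Prod.snd ++ [x.2]).getD j 0) =
        l.map (fun j => (a.map Prod.snd).getD j 0) := by
      intro l hl
      apply List.map_congr_left
      intro j hj
      rw [List.getD_eq_getElem?_getD, List.getD_eq_getElem?_getD,
        List.getElem?_append_left (by simp; exact hl j hj)]
    unfold stepSN
    rw [hcong, hget]
    by_cases hx : (x.1 == '+') = true
    · rw [if_pos hx]
      unfold stepB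
      rw [if_pos (by exact beq_iff_eq.mp hx)]
      rw [List.map_append, hmap _ (SN_lt _ _)]
      congr 1
      simp only [List.map_cons, List.map_nil]
      congr 1
      have hl : a.length = (a.map Prod.snd).length := by simp
      rw [hl, List.getD_eq_getElem?_getD]
      simp
    · rw [if_neg hx]
      unfold stepB
      rw [if_neg (by intro hc; exact hx (beq_iff_eq.mpr hc))]
      rw [List.map_dropLast, hmap _ (SN_lt _ _)]

theorem annOf_fst (b : List Int) (i : Int) (L : List Int) :
    ∀ x ∈ annOf b i L, x.1 = '+' ∨ x.1 = '-' := by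
  intro x hx
  rw [annOf, List.mem_filterMap] at hx
  obtain ⟨p, -, hp⟩ := hx
  rcases h : PySem.List.pyGet? b p with _ | v <;> rw [h] at hp
  · cases hp
  · dsimp only at hp
    split_ifs at hp <;> cases hp <;> simp

theorem annOf_snd (b : List Int) (i : Int) (L : List Int) :
    ∀ x ∈ annOf b i L, x.2 ∈ L := by
  intro x hx
  rw [annOf, List.mem_filterMap] at hx
  obtain ⟨p, hpL, hp⟩ := hx
  rcases h : PySem.List.pyGet? b p with _ | v <;> rw [h] at hp
  · cases hp
  · dsimp only at hp
    split_ifs at hp <;> cases hp <;> simp_all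

-- ===== VERDICT (by name: the statement is the Claim_ definition above) =====
theorem crystal_fi_spec : Claim_equal_crystal_fi := by
  intro b i n k _hdom hpre
  unfold Spec_crystal_fi
  unfold Pre_crystal_fi at hpre
  have hok : ∀ p ∈ PySem.List.pyRange 0 k 1, (PySem.List.pyGet? b p).isSome := by
    intro p hp
    rw [PySem.List.mem_pyRange_one] at hp
    rw [PySem.List.pyGet?_of_nonneg b hp.1]
    simp [List.getElem?_eq_getElem (show p.toNat < b.length by omega)]
  unfold crystal_fi crystal_fi_alt
  rw [fiCollect_eq b i _ hok, altLoop_eq b i _ hok [], stack_eq]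
  set a := annOf b i (PySem.List.pyRange 0 k 1) with ha
  have hsp : ∀ c ∈ a.map Prod.fst, c = '+' ∨ c = '-' := by
    intro c hc
    obtain ⟨x, hxa, hxc⟩ := List.mem_map.mp hc
    exact hxc ▸ annOf_fst b i _ x hxa
  obtain ⟨-, -, hunm⟩ :=
    matchLoop_inv (a.map Prod.fst) hsp (a.map Prod.fst).length le_rfl
  simp only []
  rw [fiTargetLoop_eq]
  rw [show List.filter
      (fun q => ((a.map Prod.fst).getD q ' ' == '+') &&
        !((fiMatchLoop (a.map Prod.fst)
            (List.replicate (a.map Prod.fst).length false)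
            (List.range (a.map Prod.fst).length)).getD q false))
      (List.range (a.map Prod.fst).length) = SN (a.map Prod.fst) (a.map Prod.fst).length
    from hunm]
  have hlen : (a.map Prod.fst).length = a.length := List.length_map ..
  rw [hlen]
  by_cases hanil : a.map Prod.fst = []
  · have hnil : a = [] := by simpa using hanil
    rw [if_pos hanil]
    simp [hnil, SN]
  · rw [if_neg hanil]
    rcases hh : (SN (a.map Prod.fst) a.length).head? with _ | j
    · rw [List.head?_eq_none_iff] at hh
      rw [hh]
      simp
    · obtain ⟨tl, htl⟩ := List.head?_eq_some_iff.mp hh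
      have hjmem : j ∈ SN (a.map Prod.fst) a.length := by rw [htl]; simp
      have hjlt : j < a.length := SN_lt _ _ j hjmem
      have hjlen : j < (a.map Prod.snd).length := by simpa using hjlt
      have htmem : (a.map Prod.snd).getD j 0 ∈ a.map Prod.snd := by
        rw [List.getD_eq_getElem _ _ hjlen]
        exact List.getElem_mem hjlen
      obtain ⟨x, hxa, hx2⟩ := List.mem_map.mp htmem
      have hxrange := annOf_snd b i _ x hxa
      rw [PySem.List.mem_pyRange_one] at hxrange
      have hge : (0 : Int) ≤ (a.map Prod.snd).getD j 0 := hx2 ▸ hxrange.1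
      rw [if_neg (by intro hc; dsimp only at hc; rw [hc] at hge; exact absurd hge (by norm_num)), htl]
      simp
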